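-- pv_equiv track=rewrite | github.com/Sailia/AI_Class | 8-queens.py | highest_value_successor
-- ===== SOURCE A (Python) =====
-- def highest_value_successor(all_successors):
--     # get all successors
--
--     # find the successor with the minimum heuristic
--     minimum = evaluate_heuristic(all_successors[0])
--     minimum_successor = all_successors[0]
--     for successor in all_successors:
--         if(evaluate_heuristic(successor) < minimum):
--             minimum = evaluate_heuristic(successor)
--             # also keep track of the successor that resulted in the minimum
--             minimum_successor = successor
--     # return the minimum successor
--     return minimum_successor
--
-- def evaluate_heuristic(board):
--     attacking_queens = 0
--     count = 0
--     for queen in board: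
--         count_other = count+1
--         for other_queen in board[count + 1:]:
--             #get the distance between queen and the next
--             queen_distance = abs(count - count_other)
--             # get the distance between the rows of the two queens I'm comparing
--             row_distance = abs(queen - other_queen)
--             # if row distance equals 0 then increase the attack by one
--             if(row_distance == 0):
--                 attacking_queens += 1
--             #if the queen distance equals to row distance then attacking queens increments by one (count, other_count)
--             elif(queen_distance == row_distance):
--                 attacking_queens += 1
--             count_other += 1
--         count += 1
--     return attacking_queens
-- ===== SOURCE B (Python) =====
-- def highest_value_successor(all_successors):
--     # O(m*n): heuristic per board in one pass with row/diagonal/anti-diagonal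
--     # counters; pick the first board with the minimal heuristic.
--     def heuristic(board):
--         rows = {}
--         diag = {}
--         anti = {}
--         attacks = 0
--         for i, q in enumerate(board):
--             attacks += rows.get(q, 0) + diag.get(q - i, 0) + anti.get(q + i, 0)
--             rows[q] = rows.get(q, 0) + 1
--             diag[q - i] = diag.get(q - i, 0) + 1
--             anti[q + i] = anti.get(q + i, 0) + 1
--         return attacks
--     return min(all_successors, key=heuristic)
-- ===== Notes on version B (the rewrite author's own statement) =====
-- stated objective: faster
-- what changed: The heuristic now counts attacking pairs in one pass with row/diagonal/anti-diagonal hash counters (adding, per queen, the number of earlier queens sharing a line) instead of comparing all O(n^2) queen pairs, and the selection is a single min(..., key=) call; Pre_ excludes the empty successor list, on which A raises IndexError (and B's min raises ValueError).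
import Mathlib
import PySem

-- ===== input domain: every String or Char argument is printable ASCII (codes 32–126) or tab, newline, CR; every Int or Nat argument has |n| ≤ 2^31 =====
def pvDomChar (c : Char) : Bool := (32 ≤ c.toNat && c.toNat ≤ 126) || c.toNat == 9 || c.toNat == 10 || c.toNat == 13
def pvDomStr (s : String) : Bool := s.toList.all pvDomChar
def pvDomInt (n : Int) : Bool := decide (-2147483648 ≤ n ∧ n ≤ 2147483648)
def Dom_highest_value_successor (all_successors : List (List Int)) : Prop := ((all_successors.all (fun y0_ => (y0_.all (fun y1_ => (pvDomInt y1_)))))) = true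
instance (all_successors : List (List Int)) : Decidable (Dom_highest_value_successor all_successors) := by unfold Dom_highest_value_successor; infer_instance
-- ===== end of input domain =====

-- B computes each board's heuristic in one pass with row/diagonal/anti-diagonal
-- counter dictionaries instead of comparing every pair of queens, and selects
-- the minimum with a single min(..., key=) call.

-- ===== PORT A =====

def evaluate_heuristic (board : List Int) : Int :=
  (board.foldl (fun (s : Int × Int) queen =>
      let inner := (PySem.List.slice board (some (s.2 + 1)) none).foldl
        (fun (t : Int × Int) other_queen =>
          let queen_distance := |s.2 - t.2|
          let row_distance := |queen - other_queen|
          (if row_distance = 0 then t.1 + 1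
           else if queen_distance = row_distance then t.1 + 1 else t.1,
           t.2 + 1))
        (s.1, s.2 + 1)
      (inner.1, s.2 + 1)) (0, 0)).1

def highest_value_successor (all_successors : List (List Int)) : List Int :=
  let first := PySem.List.pyGetD all_successors 0 []
  (all_successors.foldl
    (fun (s : Int × List Int) successor =>
      if evaluate_heuristic successor < s.1 then (evaluate_heuristic successor, successor) else s)
    (evaluate_heuristic first, first)).2

-- ===== PORT B =====
def hva_heuristic (board : List Int) : Int :=
  ((PySem.List.enumerate board 0).foldl
    (fun (s : Int × PySem.Dict Int Int × PySem.Dict Int Int × PySem.Dict Int Int) p =>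
      let i := p.1
      let q := p.2
      let attacks := s.1 + s.2.1.getD q 0 + s.2.2.1.getD (q - i) 0 + s.2.2.2.getD (q + i) 0
      (attacks,
       s.2.1.insert q (s.2.1.getD q 0 + 1),
       s.2.2.1.insert (q - i) (s.2.2.1.getD (q - i) 0 + 1),
       s.2.2.2.insert (q + i) (s.2.2.2.getD (q + i) 0 + 1)))
    (0, PySem.Dict.empty, PySem.Dict.empty, PySem.Dict.empty)).1

def highest_value_successor_alt (all_successors : List (List Int)) : List Int :=
  PySem.List.minD all_successors hva_heuristic []

-- ===== PRECONDITION & SPEC =====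
-- Pre_ excludes only the empty list: there A raises IndexError (all_successors[0])
-- and B's min(...) raises ValueError.
def Pre_highest_value_successor (all_successors : List (List Int)) : Prop :=
  all_successors ≠ []
instance (all_successors : List (List Int)) : Decidable (Pre_highest_value_successor all_successors) := by unfold Pre_highest_value_successor; infer_instance

def pvWitness_highest_value_successor : List (List Int) := [[0, 1], [0, 0], [1, 3]]

def Spec_highest_value_successor (all_successors : List (List Int)) (out : List Int) : Prop := out = highest_value_successor_alt all_successors
instance (all_successors : List (List Int)) (out : List Int) : Decidable (Spec_highest_value_successor all_successors out) := by unfold Spec_highest_value_successor; infer_instance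

-- ===== CLAIM (what is proved, stated in full; the proofs are below) =====
def Claim_equal_highest_value_successor : Prop := ∀ (all_successors : List (List Int)), Dom_highest_value_successor all_successors → Pre_highest_value_successor all_successors → Spec_highest_value_successor all_successors (highest_value_successor all_successors)

-- ===== LEMMAS AND PROOFS =====

-- 'the queen at index a.1 on row a.2 and the queen at index b.1 on row b.2 attack each other'

def pvConf (a b : Int × Int) : Bool := a.2 == b.2 || |a.1 - b.1| == |a.2 - b.2|

-- number of attacking pairs, counted per queen against the LATER queens (A's order)
def pvSufCnt : List (Int × Int) → Nat
  | [] => 0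
  | x :: t => t.countP (fun y => pvConf x y) + pvSufCnt t

-- number of attacking pairs, counted per queen against the EARLIER queens (B's order)
def pvPreCnt : List (Int × Int) → List (Int × Int) → Nat
  | _, [] => 0
  | seen, x :: t => seen.countP (fun s => pvConf s x) + pvPreCnt (seen ++ [x]) t

lemma pvConf_comm (a b : Int × Int) : pvConf a b = pvConf b a := by
  simp only [pvConf, abs_sub_comm]
  rw [Bool.beq_comm]

lemma pvSumIte {α : Type} (t : List α) (p : α → Bool) :
    (t.map fun y => if p y then 1 else 0).sum = t.countP p := by
  induction t with
  | nil => simp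
  | cons z zs ihz =>
    rw [List.map_cons, List.sum_cons, ihz, List.countP_cons]
    split <;> omega

lemma pvPreCnt_eq (l : List (Int × Int)) :
    ∀ seen, pvPreCnt seen l
      = (l.map (fun y => seen.countP (fun s => pvConf s y))).sum + pvSufCnt l := by
  induction l with
  | nil => intro seen; simp [pvPreCnt, pvSufCnt]
  | cons x t ih =>
    intro seen
    simp only [pvPreCnt, pvSufCnt, ih, List.map_cons, List.sum_cons]
    have hsplit : ∀ y, (seen ++ [x]).countP (fun s => pvConf s y)
        = seen.countP (fun s => pvConf s y) + if pvConf x y then 1 else 0 := by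
      intro y; simp [List.countP_append, List.countP_cons]
    simp only [hsplit, pvConf_comm x]
    rw [List.sum_map_add, pvSumIte t (fun y => pvConf y x)]
    omega

-- the two traversal orders count the same set of pairs
lemma pvPreCnt_nil_eq (l : List (Int × Int)) : pvPreCnt [] l = pvSufCnt l := by
  simp [pvPreCnt_eq]

-- A's inner loop counts the later queens attacking queen (i0, q0)
lemma pvInner (l : List Int) (i0 q0 : Int) :
    ∀ (a c : Int),
      l.foldl (fun (t : Int × Int) other_queen =>
          (if |q0 - other_queen| = 0 then t.1 + 1
           else if |i0 - t.2| = |q0 - other_queen| then t.1 + 1 else t.1,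
           t.2 + 1)) (a, c)
      = (a + ((PySem.List.enumerate l c).countP (fun s => pvConf (i0, q0) s) : Int),
         c + l.length) := by
  induction l with
  | nil => intro a c; simp [PySem.List.enumerate_nil]
  | cons o rest ih =>
    intro a c
    rw [List.foldl_cons, ih, PySem.List.enumerate_cons, List.countP_cons]
    have hcond : (if |q0 - o| = 0 then a + 1 else if |i0 - c| = |q0 - o| then a + 1 else a)
        = a + if pvConf (i0, q0) (c, o) then 1 else 0 := by
      simp only [pvConf]
      by_cases h1 : q0 = o
      · simp [h1]
      · have : ¬ |q0 - o| = 0 := by simpa [sub_eq_zero] using h1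
        by_cases h2 : |i0 - c| = |q0 - o| <;>
          simp [this, h1, h2]
    simp only [Prod.mk.injEq, List.length_cons]
    constructor
    · rw [hcond]; push_cast; split <;> ring
    · push_cast; ring

-- A's outer loop, generalized over the already-processed prefix of the board
lemma pvOuter (board : List Int) :
    ∀ (suf pre : List Int) (a : Int), board = pre ++ suf →
      suf.foldl (fun (s : Int × Int) queen =>
        let inner := (PySem.List.slice board (some (s.2 + 1)) none).foldl
          (fun (t : Int × Int) other_queen =>
            let queen_distance := |s.2 - t.2|
            let row_distance := |queen - other_queen|
            (if row_distance = 0 then t.1 + 1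
             else if queen_distance = row_distance then t.1 + 1 else t.1,
             t.2 + 1))
          (s.1, s.2 + 1)
        (inner.1, s.2 + 1)) (a, (pre.length : Int))
      = (a + (pvSufCnt (PySem.List.enumerate suf pre.length) : Int),
         (pre.length : Int) + suf.length) := by
  intro suf
  induction suf with
  | nil => intro pre a _; simp [PySem.List.enumerate_nil, pvSufCnt]
  | cons q rest ih =>
    intro pre a hb
    rw [List.foldl_cons]
    have hslice : PySem.List.slice board (some ((pre.length : Int) + 1)) none = rest := by
      rw [PySem.List.slice_from board (by omega)]
      have h1 : (((pre.length : Int)) + 1).toNat = (pre ++ [q]).length := by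
        simp
      rw [h1, hb]
      have : pre ++ q :: rest = (pre ++ [q]) ++ rest := by simp
      rw [this, List.drop_left]
    simp only [hslice]
    rw [pvInner rest (pre.length : Int) q a ((pre.length : Int) + 1)]
    have hlen : ((pre ++ [q]).length : Int) = (pre.length : Int) + 1 := by simp
    have := ih (pre ++ [q])
      (a + ((PySem.List.enumerate rest ((pre.length : Int) + 1)).countP
        (fun s => pvConf ((pre.length : Int), q) s) : Int))
      (by simpa using hb)
    rw [hlen] at this
    rw [this]
    rw [PySem.List.enumerate_cons]
    simp only [pvSufCnt, List.length_cons, Prod.mk.injEq]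
    constructor
    · push_cast; ring
    · push_cast; ring

lemma pvEvalA (board : List Int) :
    evaluate_heuristic board = (pvSufCnt (PySem.List.enumerate board 0) : Int) := by
  unfold evaluate_heuristic
  have := pvOuter board board [] 0 rfl
  simp only [List.length_nil, Nat.cast_zero] at this
  rw [this]
  simp

-- the three counter lookups together count the earlier queens attacking (i, q)
lemma pvSplit (seen : List (Int × Int)) (i q : Int) (h : ∀ s ∈ seen, s.1 < i) :
    seen.countP (fun s => s.2 == q)
      + seen.countP (fun s => s.2 - s.1 == q - i)
      + seen.countP (fun s => s.2 + s.1 == q + i)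
    = seen.countP (fun s => pvConf s (i, q)) := by
  induction seen with
  | nil => simp
  | cons s t ih =>
    have hs : s.1 < i := h s (List.mem_cons_self)
    have ht := ih (fun x hx => h x (List.mem_cons_of_mem s hx))
    simp only [List.countP_cons]
    have habs : |s.1 - i| = i - s.1 := by rw [abs_sub_comm]; exact abs_of_pos (by omega)
    have hcase : ((if (s.2 == q) = true then 1 else 0)
          + (if (s.2 - s.1 == q - i) = true then 1 else 0))
          + (if (s.2 + s.1 == q + i) = true then 1 else 0)
        = if pvConf s (i, q) = true then 1 else 0 := by
      simp only [pvConf, habs, beq_iff_eq, Bool.or_eq_true]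
      rcases abs_cases (s.2 - q) with ⟨he, hsign⟩ | ⟨he, hsign⟩ <;> rw [he] <;> split_ifs <;> omega
    omega

-- B's single pass with its three counter dictionaries computes the earlier-queen count
lemma pvBLoop (l : List (Int × Int)) :
    ∀ (seen : List (Int × Int)) (att : Int) (r d a : PySem.Dict Int Int),
      (∀ k, r.getD k 0 = (seen.countP (fun s => s.2 == k) : Int)) →
      (∀ k, d.getD k 0 = (seen.countP (fun s => s.2 - s.1 == k) : Int)) →
      (∀ k, a.getD k 0 = (seen.countP (fun s => s.2 + s.1 == k) : Int)) →
      (∀ s ∈ seen, ∀ x ∈ l, s.1 < x.1) →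
      l.Pairwise (fun x y => x.1 < y.1) →
      (l.foldl (fun (s : Int × PySem.Dict Int Int × PySem.Dict Int Int × PySem.Dict Int Int) p =>
          let i := p.1
          let q := p.2
          let attacks := s.1 + s.2.1.getD q 0 + s.2.2.1.getD (q - i) 0 + s.2.2.2.getD (q + i) 0
          (attacks,
           s.2.1.insert q (s.2.1.getD q 0 + 1),
           s.2.2.1.insert (q - i) (s.2.2.1.getD (q - i) 0 + 1),
           s.2.2.2.insert (q + i) (s.2.2.2.getD (q + i) 0 + 1)))
        (att, r, d, a)).1
      = att + (pvPreCnt seen l : Int) := by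
  induction l with
  | nil =>
    intro seen att r d a _ _ _ _ _
    simp [pvPreCnt]
  | cons p t ih =>
    obtain ⟨i, q⟩ := p
    intro seen att r d a hr hd ha hlt hpw
    rw [List.foldl_cons]
    have hseen_i : ∀ s ∈ seen, s.1 < i := fun s hs => hlt s hs (i, q) List.mem_cons_self
    have hattacks : att + r.getD q 0 + d.getD (q - i) 0 + a.getD (q + i) 0
        = att + (seen.countP (fun s => pvConf s (i, q)) : Int) := by
      rw [hr, hd, ha, ← pvSplit seen i q hseen_i]
      push_cast; ring
    have hpair := List.pairwise_cons.mp hpw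
    have hr' : ∀ k, (r.insert q (r.getD q 0 + 1)).getD k 0
        = ((seen ++ [(i, q)]).countP (fun s => s.2 == k) : Int) := by
      intro k
      rw [PySem.Dict.getD_insert, List.countP_append]
      simp only [hr]
      by_cases hk : k = q
      · subst hk
        rw [if_pos rfl]
        simp
      · rw [if_neg hk]
        simp [Ne.symm hk]
    have hd' : ∀ k, (d.insert (q - i) (d.getD (q - i) 0 + 1)).getD k 0
        = ((seen ++ [(i, q)]).countP (fun s => s.2 - s.1 == k) : Int) := by
      intro k
      rw [PySem.Dict.getD_insert, List.countP_append]
      simp only [hd]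
      by_cases hk : k = q - i
      · subst hk
        rw [if_pos rfl]
        simp
      · rw [if_neg hk]
        simp [Ne.symm hk]
    have ha' : ∀ k, (a.insert (q + i) (a.getD (q + i) 0 + 1)).getD k 0
        = ((seen ++ [(i, q)]).countP (fun s => s.2 + s.1 == k) : Int) := by
      intro k
      rw [PySem.Dict.getD_insert, List.countP_append]
      simp only [ha]
      by_cases hk : k = q + i
      · subst hk
        rw [if_pos rfl]
        simp
      · rw [if_neg hk]
        simp [Ne.symm hk]
    have hlt' : ∀ s ∈ seen ++ [(i, q)], ∀ x ∈ t, s.1 < x.1 := by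
      intro s hs x hx
      rcases List.mem_append.mp hs with h | h
      · exact hlt s h x (List.mem_cons_of_mem _ hx)
      · simp at h; subst h; exact hpair.1 x hx
    have := ih (seen ++ [(i, q)])
      (att + r.getD q 0 + d.getD (q - i) 0 + a.getD (q + i) 0)
      _ _ _ hr' hd' ha' hlt' hpair.2
    rw [this, hattacks]
    simp only [pvPreCnt]
    push_cast; ring

lemma pvEvalB (board : List Int) :
    hva_heuristic board = (pvPreCnt [] (PySem.List.enumerate board 0) : Int) := by
  unfold hva_heuristic
  rw [pvBLoop (PySem.List.enumerate board 0) [] 0 PySem.Dict.empty PySem.Dict.empty PySem.Dict.empty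
      (by intro k; simp [PySem.Dict.getD_empty])
      (by intro k; simp [PySem.Dict.getD_empty])
      (by intro k; simp [PySem.Dict.getD_empty])
      (by intro s hs; simp at hs)
      (PySem.List.pairwise_lt_enumerate board 0)]
  simp

lemma pvHeuEq (board : List Int) : evaluate_heuristic board = hva_heuristic board := by
  rw [pvEvalA, pvEvalB, pvPreCnt_nil_eq]

-- A's running-minimum fold computes the same element as B's min(..., key=) fold
lemma pvMinFold (t : List (List Int)) :
    ∀ (x : List Int),
      t.foldl (fun acc y =>
          match acc with
          | none => some y
          | some m => if hva_heuristic y < hva_heuristic m then some y else some m)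
        (some x)
      = some ((t.foldl (fun (s : Int × List Int) successor =>
          if evaluate_heuristic successor < s.1 then (evaluate_heuristic successor, successor) else s)
          (evaluate_heuristic x, x)).2) := by
  induction t with
  | nil => intro x; simp
  | cons y t ih =>
    intro x
    rw [List.foldl_cons, List.foldl_cons]
    by_cases h : hva_heuristic y < hva_heuristic x
    · have h' : evaluate_heuristic y < evaluate_heuristic x := by rw [pvHeuEq, pvHeuEq]; exact h
      simp only [h, h', if_true]
      exact ih y
    · have h' : ¬ evaluate_heuristic y < evaluate_heuristic x := by rw [pvHeuEq, pvHeuEq]; exact h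
      simp only [if_neg h, if_neg h']
      exact ih x

lemma pvMin?_eq (xs : List (List Int)) :
    PySem.List.min? xs hva_heuristic
      = xs.foldl (fun acc y => match acc with
          | none => some y
          | some m => if hva_heuristic y < hva_heuristic m then some y else some m) none := by
  unfold PySem.List.min?
  congr 1
  funext acc y
  cases acc <;> rfl

lemma pvFinal : ∀ (all : List (List Int)), all ≠ [] →
    highest_value_successor all = highest_value_successor_alt all := by
  intro all hne
  cases all with
  | nil => exact absurd rfl hne
  | cons x t =>
    unfold highest_value_successor highest_value_successor_alt PySem.List.minD
    rw [PySem.List.pyGetD_zero_cons, pvMin?_eq]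
    show ((x :: t).foldl (fun (s : Int × List Int) successor =>
        if evaluate_heuristic successor < s.1 then (evaluate_heuristic successor, successor) else s)
        (evaluate_heuristic x, x)).2
      = (t.foldl (fun acc y => match acc with
          | none => some y
          | some m => if hva_heuristic y < hva_heuristic m then some y else some m) (some x)).getD []
    · rw [List.foldl_cons, if_neg (lt_irrefl (evaluate_heuristic x)), pvMinFold t x]
      rfl

-- ===== VERDICT (by name: the statement is the Claim_ definition above) =====
theorem highest_value_successor_spec : Claim_equal_highest_value_successor := by
  intro all_successors _ hpre
  unfold Spec_highest_value_successor
  exact pvFinal all_successors hpre
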